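-- pv_equiv track=rewrite | github.com/elenasofia98/compositional-embeddings | spearman_correlation_in_voc.py | _farest
-- ===== SOURCE A (Python) =====
-- def _farest(values, centers):
--     max = 0
--     for value in values:
--         d_value = min([abs(value - c) for c in centers])
--         if d_value > max:
--             max = d_value
--             next = value
--
--     return next
-- ===== SOURCE B (Python) =====
-- def _farest(values, centers):
--     cs = sorted(centers)
--     m = len(cs)
--     best_d = 0
--     best_v = None
--     for v in values:
--         # bisect_left(cs, v), hand-written (the module imports nothing)
--         lo, hi = 0, m
--         while lo < hi:
--             mid = (lo + hi) // 2
--             if cs[mid] < v: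
--                 lo = mid + 1
--             else:
--                 hi = mid
--         if lo < m:
--             d = cs[lo] - v
--             if lo > 0 and v - cs[lo - 1] < d:
--                 d = v - cs[lo - 1]
--         else:
--             d = v - cs[m - 1]
--         if d > best_d:
--             best_d = d
--             best_v = v
--     if best_v is None:
--         raise ValueError("no value lies at positive distance from the centers")
--     return best_v
-- ===== Notes on version B (the rewrite author's own statement) =====
-- stated objective: faster
-- what changed: B sorts the centers once and finds each value's nearest center by binary search instead of scanning all centers for every value.
import Mathlib
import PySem

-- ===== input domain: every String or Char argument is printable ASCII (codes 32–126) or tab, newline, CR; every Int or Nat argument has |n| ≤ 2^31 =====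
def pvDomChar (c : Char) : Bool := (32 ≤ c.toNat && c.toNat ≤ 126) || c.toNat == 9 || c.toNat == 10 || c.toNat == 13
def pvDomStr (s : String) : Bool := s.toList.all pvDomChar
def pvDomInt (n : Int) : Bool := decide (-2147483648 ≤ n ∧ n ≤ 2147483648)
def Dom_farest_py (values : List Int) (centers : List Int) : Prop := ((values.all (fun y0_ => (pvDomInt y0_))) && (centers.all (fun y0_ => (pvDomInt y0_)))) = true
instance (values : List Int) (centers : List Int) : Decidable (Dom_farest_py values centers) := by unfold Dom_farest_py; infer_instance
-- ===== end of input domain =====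

-- B sorts the centers once and binary-searches each value's nearest center (O((n+m) log m))
-- instead of A's scan of every center per value (O(n*m)); return values agree on all inputs
-- on which the Python A returns (Pre_ below).


-- ===== PORT A =====
-- d_value = min([abs(value - c) for c in centers]); min([]) raises ValueError (excluded by Pre_),
-- so the .getD 0 is never reached inside Pre_.
def pvMinDist (value : Int) (centers : List Int) : Int :=
  (PySem.List.min? (centers.map (fun c => |value - c|)) (fun x => x)).getD 0

-- the loop carries (max, next); next is unbound (NameError) until some d_value > 0 is seen,
-- modelled as Option Int; Pre_ guarantees it is bound at the return, so .getD 0 is never reached.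
def farest_py (values : List Int) (centers : List Int) : Int :=
  (values.foldl
    (fun (st : Int × Option Int) value =>
      let d_value := pvMinDist value centers
      if d_value > st.1 then (d_value, some value) else st)
    (0, none)).2.getD 0

-- ===== PORT B =====
-- the hand-written while loop in Source B is exactly Python's bisect_left, ported as
-- PySem.List.bisectLeft (same loop: lo/hi, mid = (lo+hi)//2, cs[mid] < v narrows).
-- cs[m-1] with m = 0 raises IndexError in Python (empty centers, excluded by Pre_).
def pvNearestD (cs : List Int) (v : Int) : Int :=
  let m := cs.length
  let lo := PySem.List.bisectLeft cs v
  if lo < m then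
    let d := cs.getD lo 0 - v
    if 0 < lo ∧ v - cs.getD (lo - 1) 0 < d then v - cs.getD (lo - 1) 0 else d
  else v - cs.getD (m - 1) 0

-- best_v is None until some d > 0 is seen; Source B raises ValueError on None (excluded by Pre_),
-- so the .getD 0 is never reached inside Pre_.
def farest_py_alt (values : List Int) (centers : List Int) : Int :=
  let cs := PySem.List.sorted centers (fun x => x) false
  (values.foldl
    (fun (st : Int × Option Int) v =>
      let d := pvNearestD cs v
      if d > st.1 then (d, some v) else st)
    (0, none)).2.getD 0

-- ===== PRECONDITION & SPEC =====
-- Exactly the inputs on which Python A returns: centers nonempty (else min([]) raises ValueError)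
-- and some value at positive distance from every center (else `next` is unbound: NameError).
def Pre_farest_py (values : List Int) (centers : List Int) : Prop :=
  centers ≠ [] ∧ ∃ v ∈ values, v ∉ centers
instance (values : List Int) (centers : List Int) : Decidable (Pre_farest_py values centers) := by unfold Pre_farest_py; infer_instance
def pvWitness_farest_py : List Int × List Int := ([0, 5], [1])

def Spec_farest_py (values : List Int) (centers : List Int) (out : Int) : Prop := out = farest_py_alt values centers
instance (values : List Int) (centers : List Int) (out : Int) : Decidable (Spec_farest_py values centers out) := by unfold Spec_farest_py; infer_instance

-- ===== CLAIM (what is proved, stated in full; the proofs are below) =====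
def Claim_equal_farest_py : Prop := ∀ (values : List Int) (centers : List Int), Dom_farest_py values centers → Pre_farest_py values centers → Spec_farest_py values centers (farest_py values centers)

-- ===== LEMMAS AND PROOFS =====

-- sorted lists are index-monotone
theorem pv_sorted_mono {cs : List Int} (h : List.Pairwise (· ≤ ·) cs)
    {p q : Nat} (hpq : p ≤ q) (hq : q < cs.length) : cs[p]'(lt_of_le_of_lt hpq hq) ≤ cs[q] := by
  rcases Nat.lt_or_ge p q with hlt | hge
  · exact (List.pairwise_iff_getElem.mp h) p q _ hq hlt
  · have : p = q := le_antisymm hpq hge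
    subst this; exact le_refl _

-- pvNearestD on a sorted nonempty list is attained and is a lower bound of all |v - c|
theorem pv_nearest_props (cs : List Int) (v : Int)
    (hs : List.Pairwise (· ≤ ·) cs) (hne : cs ≠ []) :
    (∃ c ∈ cs, pvNearestD cs v = |v - c|) ∧ ∀ c ∈ cs, pvNearestD cs v ≤ |v - c| := by
  obtain ⟨hle_len, hlt, hge⟩ := PySem.List.bisectLeft_spec cs v hs
  unfold pvNearestD
  set m := cs.length with hm
  set lo := PySem.List.bisectLeft cs v with hlo
  have hmpos : 0 < m := by
    cases cs with
    | nil => exact absurd rfl hne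
    | cons a t => simp [hm]
  by_cases hlom : lo < m
  · have hgetlo : cs.getD lo 0 = cs[lo] := List.getD_eq_getElem cs 0 hlom
    have hvlo : v ≤ cs[lo] := hge lo hlom (le_refl _)
    have habs_lo : |v - cs[lo]| = cs[lo] - v := by
      rw [abs_of_nonpos (by omega), neg_sub]
    simp only [if_pos hlom, hgetlo]
    by_cases hbr : 0 < lo ∧ v - cs.getD (lo - 1) 0 < cs[lo] - v
    · -- left neighbour is strictly closer
      have hlo1 : lo - 1 < m := by omega
      have hget1 : cs.getD (lo - 1) 0 = cs[lo - 1] := List.getD_eq_getElem cs 0 hlo1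
      have hlt1 : cs[lo - 1] < v := hlt (lo - 1) hlo1 (by omega)
      have habs1 : |v - cs[lo - 1]| = v - cs[lo - 1] := abs_of_nonneg (by omega)
      rw [if_pos hbr]
      refine ⟨⟨cs[lo - 1], List.getElem_mem _, by rw [hget1, habs1]⟩, ?_⟩
      intro c hc
      obtain ⟨j, hj, rfl⟩ := List.mem_iff_getElem.mp hc
      rcases Nat.lt_or_ge j lo with hjlo | hjlo
      · have h1 : cs[j] ≤ cs[lo - 1] := pv_sorted_mono hs (by omega) hlo1
        have h2 : cs[j] < v := hlt j hj hjlo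
        rw [hget1, abs_of_nonneg (by omega)]; omega
      · have h1 : cs[lo] ≤ cs[j] := pv_sorted_mono hs hjlo hj
        have h2 : v ≤ cs[j] := hge j hj hjlo
        rw [hget1, abs_of_nonpos (by omega), neg_sub]
        obtain ⟨_, hb2⟩ := hbr
        rw [hget1] at hb2; omega
    · rw [if_neg hbr]
      refine ⟨⟨cs[lo], List.getElem_mem _, habs_lo.symm⟩, ?_⟩
      intro c hc
      obtain ⟨j, hj, rfl⟩ := List.mem_iff_getElem.mp hc
      rcases Nat.lt_or_ge j lo with hjlo | hjlo
      · have hpos : 0 < lo := by omega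
        have hlo1 : lo - 1 < m := by omega
        have hget1 : cs.getD (lo - 1) 0 = cs[lo - 1] := List.getD_eq_getElem cs 0 hlo1
        have hnb : ¬ (v - cs.getD (lo - 1) 0 < cs[lo] - v) := fun h => hbr ⟨hpos, h⟩
        rw [hget1] at hnb
        have h1 : cs[j] ≤ cs[lo - 1] := pv_sorted_mono hs (by omega) hlo1
        have h2 : cs[j] < v := hlt j hj hjlo
        rw [abs_of_nonneg (by omega)]; omega
      · have h1 : cs[lo] ≤ cs[j] := pv_sorted_mono hs hjlo hj
        have h2 : v ≤ cs[j] := hge j hj hjlo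
        rw [abs_of_nonpos (by omega), neg_sub]; omega
  · -- lo = m: every center is < v, the last one is nearest
    have hloeq : lo = m := by omega
    have hm1 : m - 1 < m := by omega
    have hget : cs.getD (m - 1) 0 = cs[m - 1] := List.getD_eq_getElem cs 0 hm1
    have hltm : cs[m - 1] < v := hlt (m - 1) hm1 (by omega)
    rw [if_neg hlom, hget]
    refine ⟨⟨cs[m - 1], List.getElem_mem _, (abs_of_nonneg (by omega)).symm⟩, ?_⟩
    intro c hc
    obtain ⟨j, hj, rfl⟩ := List.mem_iff_getElem.mp hc
    have h1 : cs[j] ≤ cs[m - 1] := pv_sorted_mono hs (by omega) hm1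
    have h2 : cs[j] < v := hlt j hj (by omega)
    rw [abs_of_nonneg (by omega)]; omega

-- min? characterisation: pvMinDist equals any attained lower bound
theorem pv_minDist_eq (centers : List Int) (v : Int) (d : Int) (hne : centers ≠ [])
    (hmem : ∃ c ∈ centers, d = |v - c|) (hle : ∀ c ∈ centers, d ≤ |v - c|) :
    pvMinDist v centers = d := by
  unfold pvMinDist
  obtain ⟨c0, hc0, hd⟩ := hmem
  rcases hmin : PySem.List.min? (centers.map (fun c => |v - c|)) (fun x => x) with _ | m
  · rw [PySem.List.min?_eq_none_iff] at hmin
    exact absurd (List.map_eq_nil_iff.mp hmin) hne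
  · have hm := PySem.List.min?_mem hmin
    obtain ⟨c1, hc1, hmc⟩ := List.mem_map.mp hm
    have hlow := PySem.List.min?_isMin hmin
    have h1 : m ≤ d := by
      have := hlow (|v - c0|) (List.mem_map.mpr ⟨c0, hc0, rfl⟩)
      simpa [hd] using this
    have h2 : d ≤ m := by rw [← hmc]; exact hle c1 hc1
    simpa using le_antisymm h1 h2

theorem pv_dist_eq (centers : List Int) (v : Int) (hne : centers ≠ []) :
    pvNearestD (PySem.List.sorted centers (fun x => x) false) v = pvMinDist v centers := by
  set cs := PySem.List.sorted centers (fun x => x) false with hcs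
  have hperm : cs.Perm centers := PySem.List.sorted_perm centers (fun x => x) false
  have hcsne : cs ≠ [] := by
    intro h; exact hne (List.Perm.eq_nil (h ▸ hperm).symm)
  have hpair : List.Pairwise (· ≤ ·) cs := PySem.List.sorted_pairwise centers (fun x => x)
  obtain ⟨⟨c, hc, hattain⟩, hlb⟩ := pv_nearest_props cs v hpair hcsne
  exact (pv_minDist_eq centers v _ hne
    ⟨c, hperm.mem_iff.mp hc, hattain⟩
    (fun c' hc' => hlb c' (hperm.mem_iff.mpr hc'))).symm

theorem pv_fold_eq (centers : List Int) (hne : centers ≠ []) (values : List Int) :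
    ∀ (st : Int × Option Int),
      values.foldl (fun (st : Int × Option Int) value =>
        let d_value := pvMinDist value centers
        if d_value > st.1 then (d_value, some value) else st) st
      = values.foldl (fun (st : Int × Option Int) v =>
        let d := pvNearestD (PySem.List.sorted centers (fun x => x) false) v
        if d > st.1 then (d, some v) else st) st := by
  induction values with
  | nil => intro st; rfl
  | cons x xs ih =>
    intro st
    simp only [List.foldl_cons, pv_dist_eq centers x hne]
    exact ih _

-- ===== VERDICT (by name: the statement is the Claim_ definition above) =====
theorem farest_py_spec : Claim_equal_farest_py := by
  intro values centers _ hpre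
  unfold Spec_farest_py farest_py farest_py_alt
  rw [pv_fold_eq centers hpre.1 values]
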